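-- pv_equiv track=rewrite | github.com/Faildes/ComfyUI-TC_ADV_ZPrompt | tc_adv_zprompt_encode.py | _has_top_level_AND
-- ===== SOURCE A (Python) =====
-- def _has_top_level_AND(text: str) -> bool:
--     if "AND" not in (text or ""):
--         return False
--     pr = br = 0
--     s = text
--     n = len(s)
--     i = 0
--     while i < n:
--         ch = s[i]
--         if ch == "\\" and i + 1 < n:
--             i += 2
--             continue
--         if ch == "(":
--             pr += 1
--         elif ch == ")" and pr > 0:
--             pr -= 1
--         elif ch == "[":
--             br += 1
--         elif ch == "]" and br > 0:
--             br -= 1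
--
--         if pr == 0 and br == 0 and i + 3 <= n and s[i:i+3] == "AND":
--             prev = s[i-1] if i > 0 else " "
--             nxt  = s[i+3] if i + 3 < n else " "
--             prev_ok = prev.isspace() or (not prev.isalnum() and prev != "_")
--             nxt_ok  = nxt.isspace()  or (not nxt.isalnum()  and nxt != "_")
--             if prev_ok and nxt_ok:
--                 return True
--         i += 1
--     return False
-- ===== SOURCE B (Python) =====
-- def _has_top_level_AND(text: str) -> bool:
--     if "AND" not in (text or ""):
--         return False
--     s = text
--     n = len(s)
--     # pass 1: escape flag and nesting depth just before each index
--     escaped = []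
--     depth = []
--     pr = br = 0
--     esc = False
--     for ch in s:
--         escaped.append(esc)
--         depth.append(pr + br)
--         if esc:
--             esc = False
--         elif ch == "\\":
--             esc = True
--         elif ch == "(":
--             pr += 1
--         elif ch == ")" and pr > 0:
--             pr -= 1
--         elif ch == "[":
--             br += 1
--         elif ch == "]" and br > 0:
--             br -= 1
--     # pass 2: test each occurrence of "AND"
--     pos = s.find("AND")
--     while pos != -1:
--         if not escaped[pos] and depth[pos] == 0:
--             prev = s[pos - 1] if pos > 0 else " "
--             nxt = s[pos + 3] if pos + 3 < n else " "
--             prev_ok = prev.isspace() or (not prev.isalnum() and prev != "_")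
--             nxt_ok = nxt.isspace() or (not nxt.isalnum() and nxt != "_")
--             if prev_ok and nxt_ok:
--                 return True
--         pos = s.find("AND", pos + 1)
--     return False
-- ===== Notes on version B (the rewrite author's own statement) =====
-- stated objective: alternative
-- what changed: A's single index-jumping while loop (escape skip, bracket counters and boundary test interleaved at every index) is replaced by two passes: pass 1 builds per-index escaped/depth tables in one sweep, pass 2 visits only the keyword occurrences via str.find and checks the tables and boundary characters there.
import Mathlib
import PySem

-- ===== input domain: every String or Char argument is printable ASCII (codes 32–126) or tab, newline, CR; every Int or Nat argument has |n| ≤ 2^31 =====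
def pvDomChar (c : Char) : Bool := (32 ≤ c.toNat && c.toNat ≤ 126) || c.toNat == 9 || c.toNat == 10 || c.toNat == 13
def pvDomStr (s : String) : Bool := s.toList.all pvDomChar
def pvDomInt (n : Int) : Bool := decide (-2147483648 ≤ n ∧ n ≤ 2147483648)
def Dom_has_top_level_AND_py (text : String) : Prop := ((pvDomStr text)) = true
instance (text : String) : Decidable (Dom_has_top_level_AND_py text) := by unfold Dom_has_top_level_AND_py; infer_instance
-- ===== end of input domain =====

-- B rewrites A's single index-jumping scan as two passes (escape/depth tables, then a str.find loop
-- over the "AND" occurrences); objective: alternative decomposition, same results.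

-- ===== PORT A =====
-- A's while loop: index i, paren/bracket counters, escape chars skipped by i += 2.
def pvLoopA (s : List Char) (n i pr br : Nat) : Bool :=
  if hi : i < n then
    let ch := s.getD i ' '              -- s[i], always in range here
    if ch = '\\' ∧ i + 1 < n then
      pvLoopA s n (i + 2) pr br
    else
      let pb :=
        if ch = '(' then (pr + 1, br)
        else if ch = ')' ∧ pr > 0 then (pr - 1, br)
        else if ch = '[' then (pr, br + 1)
        else if ch = ']' ∧ br > 0 then (pr, br - 1)
        else (pr, br)
      if pb.1 = 0 ∧ pb.2 = 0 ∧ i + 3 ≤ n ∧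
          PySem.List.slice s (some (i : Int)) (some ((i : Int) + 3)) = ['A', 'N', 'D'] then
        let prev := if i > 0 then s.getD (i - 1) ' ' else ' '   -- s[i-1], in range
        let nxt  := if i + 3 < n then s.getD (i + 3) ' ' else ' '
        if (PySem.Chars.isspace prev || (!PySem.Chars.isalnum prev && prev != '_')) &&
           (PySem.Chars.isspace nxt  || (!PySem.Chars.isalnum nxt  && nxt  != '_')) then
          true
        else pvLoopA s n (i + 1) pb.1 pb.2
      else pvLoopA s n (i + 1) pb.1 pb.2
  else false
termination_by n - i
decreasing_by all_goals omega

def has_top_level_AND_py (text : String) : Bool :=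
  -- '"AND" not in (text or "")': for a str argument this containment equals '"AND" not in text'
  if !PySem.Str.isIn "AND" text then false
  else pvLoopA text.toList text.toList.length 0 0 0

-- ===== PORT B =====
-- B pass 1: one structural sweep building escaped[i] and depth[i] (level just before index i).
def pvPass1 (l : List Char) (pr br : Nat) (esc : Bool) (ea : List Bool) (da : List Nat) :
    List Bool × List Nat :=
  match l with
  | [] => (ea, da)
  | ch :: t =>
    let ea' := ea ++ [esc]
    let da' := da ++ [pr + br]
    if esc then pvPass1 t pr br false ea' da'
    else if ch = '\\' then pvPass1 t pr br true ea' da'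
    else if ch = '(' then pvPass1 t (pr + 1) br false ea' da'
    else if ch = ')' ∧ pr > 0 then pvPass1 t (pr - 1) br false ea' da'
    else if ch = '[' then pvPass1 t pr (br + 1) false ea' da'
    else if ch = ']' ∧ br > 0 then pvPass1 t pr (br - 1) false ea' da'
    else pvPass1 t pr br false ea' da'

-- B pass 2: the 'pos = s.find("AND", pos+1)' loop; fuel only makes the jump loop structural
-- (n+1 iterations always suffice, each find result is strictly larger).
def pvLoop2 (s : List Char) (n : Nat) (escaped : List Bool) (depth : List Nat) :
    Nat → Int → Bool
  | 0, _ => false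
  | fuel + 1, pos =>
    if pos = -1 then false
    else
      let p := pos.toNat
      if !escaped.getD p false && (depth.getD p 0 == 0) then   -- escaped[pos], depth[pos]: in range
        let prev := if p > 0 then s.getD (p - 1) ' ' else ' '
        let nxt  := if p + 3 < n then s.getD (p + 3) ' ' else ' '
        if (PySem.Chars.isspace prev || (!PySem.Chars.isalnum prev && prev != '_')) &&
           (PySem.Chars.isspace nxt  || (!PySem.Chars.isalnum nxt  && nxt  != '_')) then
          true
        else pvLoop2 s n escaped depth fuel (PySem.Chars.findFrom s ['A', 'N', 'D'] (pos + 1) none)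
      else pvLoop2 s n escaped depth fuel (PySem.Chars.findFrom s ['A', 'N', 'D'] (pos + 1) none)

def has_top_level_AND_py_alt (text : String) : Bool :=
  if !PySem.Str.isIn "AND" text then false
  else
    let s := text.toList
    let n := s.length
    let ed := pvPass1 s 0 0 false [] []
    pvLoop2 s n ed.1 ed.2 (n + 1) (PySem.Chars.find s ['A', 'N', 'D'])

-- ===== PRECONDITION & SPEC =====
def Spec_has_top_level_AND_py (text : String) (out : Bool) : Prop := out = has_top_level_AND_py_alt text
instance (text : String) (out : Bool) : Decidable (Spec_has_top_level_AND_py text out) := by unfold Spec_has_top_level_AND_py; infer_instance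

-- ===== CLAIM (what is proved, stated in full; the proofs are below) =====
def Claim_equal_has_top_level_AND_py : Prop := ∀ (text : String), Dom_has_top_level_AND_py text → Spec_has_top_level_AND_py text (has_top_level_AND_py text)

-- ===== LEMMAS AND PROOFS =====

-- One scan step of B's pass 1 on the state (pr, br, esc).
def pvStep (st : Nat × Nat × Bool) (ch : Char) : Nat × Nat × Bool :=
  if st.2.2 then (st.1, st.2.1, false)
  else if ch = '\\' then (st.1, st.2.1, true)
  else if ch = '(' then (st.1 + 1, st.2.1, false)
  else if ch = ')' ∧ st.1 > 0 then (st.1 - 1, st.2.1, false)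
  else if ch = '[' then (st.1, st.2.1 + 1, false)
  else if ch = ']' ∧ st.2.1 > 0 then (st.1, st.2.1 - 1, false)
  else (st.1, st.2.1, false)

-- state just before index i
def pvSt (s : List Char) (i : Nat) : Nat × Nat × Bool := (s.take i).foldl pvStep (0, 0, false)

def pvEscList : List Char → (Nat × Nat × Bool) → List Bool
  | [], _ => []
  | ch :: t, st => st.2.2 :: pvEscList t (pvStep st ch)

def pvDepList : List Char → (Nat × Nat × Bool) → List Nat
  | [], _ => []
  | ch :: t, st => (st.1 + st.2.1) :: pvDepList t (pvStep st ch)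

-- an (unescaped-or-not) occurrence of "AND" starting at i
def pvAndAt (s : List Char) (i : Nat) : Bool := (s.drop i).take 3 == ['A', 'N', 'D']

def pvBnd (s : List Char) (i : Nat) : Bool :=
  let prev := if i > 0 then s.getD (i - 1) ' ' else ' '
  let nxt  := if i + 3 < s.length then s.getD (i + 3) ' ' else ' '
  (PySem.Chars.isspace prev || (!PySem.Chars.isalnum prev && prev != '_')) &&
  (PySem.Chars.isspace nxt  || (!PySem.Chars.isalnum nxt  && nxt  != '_'))

-- "the scan accepts a match starting at i"
def pvOk (s : List Char) (i : Nat) : Bool :=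
  pvAndAt s i && !(pvSt s i).2.2 && ((pvSt s i).1 + (pvSt s i).2.1 == 0) && pvBnd s i

-- reference: first accepted match at some index ≥ i
def pvAux (s : List Char) (i : Nat) : Bool :=
  if i < s.length then
    if pvOk s i then true else pvAux s (i + 1)
  else false
termination_by s.length - i
decreasing_by omega

theorem pvPass1_eq (l : List Char) : ∀ (pr br : Nat) (esc : Bool) (ea : List Bool) (da : List Nat),
    pvPass1 l pr br esc ea da = (ea ++ pvEscList l (pr, br, esc), da ++ pvDepList l (pr, br, esc)) := by
  induction l with
  | nil => intro pr br esc ea da; simp [pvPass1, pvEscList, pvDepList]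
  | cons ch t ih =>
    intro pr br esc ea da
    simp only [pvPass1, pvEscList, pvDepList, pvStep]
    split_ifs <;> simp [*]

theorem pvEscList_get (l : List Char) : ∀ (st : Nat × Nat × Bool) (i : Nat), i < l.length →
    (pvEscList l st)[i]? = some (((l.take i).foldl pvStep st).2.2) := by
  induction l with
  | nil => intro st i h; simp at h
  | cons ch t ih =>
    intro st i h
    cases i with
    | zero => simp [pvEscList]
    | succ i =>
      simp only [pvEscList, List.getElem?_cons_succ, List.take_succ_cons, List.foldl_cons]
      exact ih _ i (by simpa using h)

theorem pvDepList_get (l : List Char) : ∀ (st : Nat × Nat × Bool) (i : Nat), i < l.length →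
    (pvDepList l st)[i]? = some (((l.take i).foldl pvStep st).1 + ((l.take i).foldl pvStep st).2.1) := by
  induction l with
  | nil => intro st i h; simp at h
  | cons ch t ih =>
    intro st i h
    cases i with
    | zero => simp [pvDepList]
    | succ i =>
      simp only [pvDepList, List.getElem?_cons_succ, List.take_succ_cons, List.foldl_cons]
      exact ih _ i (by simpa using h)

theorem pvSt_succ (s : List Char) (i : Nat) (h : i < s.length) :
    pvSt s (i + 1) = pvStep (pvSt s i) s[i] := by
  rw [pvSt, pvSt, List.take_succ_eq_append_getElem h, List.foldl_append]
  simp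

theorem pvAndAt_prefix (s : List Char) (i : Nat) :
    pvAndAt s i = true ↔ ['A', 'N', 'D'] <+: s.drop i := by
  rw [pvAndAt, beq_iff_eq, List.prefix_iff_eq_take]
  constructor <;> intro h <;> simp_all

theorem pvAndAt_head (s : List Char) (i : Nat) (h : pvAndAt s i = true) :
    s[i]? = some 'A' ∧ i + 3 ≤ s.length := by
  rw [pvAndAt_prefix] at h
  obtain ⟨rest, hr⟩ := h
  constructor
  · have h0 : (s.drop i)[0]? = s[i + 0]? := List.getElem?_drop
    rw [← hr] at h0
    simpa using h0.symm
  · have hl : (s.drop i).length = 3 + rest.length := by rw [← hr]; simp; omega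
    have := s.length_drop (i := i)
    omega
theorem pvAux_false (s : List Char) : ∀ (fuel i : Nat), s.length - i ≤ fuel →
    (∀ j, i ≤ j → pvAndAt s j = false) → pvAux s i = false := by
  intro fuel
  induction fuel with
  | zero =>
    intro i hf hj
    rw [pvAux]
    have : ¬ i < s.length := by omega
    simp [this]
  | succ fuel ih =>
    intro i hf hj
    rw [pvAux]
    by_cases hi : i < s.length
    · have hok : pvOk s i = false := by simp [pvOk, hj i le_rfl]
      simp only [hi, if_pos, hok, Bool.false_eq_true, if_false]
      exact ih (i + 1) (by omega) (fun j hij => hj j (by omega))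
    · simp [hi]

theorem pvAux_skip (s : List Char) : ∀ (fuel i p : Nat), p - i ≤ fuel → i ≤ p → p ≤ s.length →
    (∀ j, i ≤ j → j < p → pvAndAt s j = false) → pvAux s i = pvAux s p := by
  intro fuel
  induction fuel with
  | zero =>
    intro i p hf hip hp hj
    have : i = p := by omega
    rw [this]
  | succ fuel ih =>
    intro i p hf hip hp hj
    rcases Nat.eq_or_lt_of_le hip with h | h
    · rw [h]
    · have hi : i < s.length := by omega
      have hok : pvOk s i = false := by simp [pvOk, hj i le_rfl h]
      rw [pvAux]
      simp only [hi, if_pos, hok, Bool.false_eq_true, if_false]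
      exact ih (i + 1) p (by omega) (by omega) hp (fun j h1 h2 => hj j (by omega) h2)
theorem pvLoopA_eq (s : List Char) : ∀ (fuel i pr br : Nat), s.length - i ≤ fuel →
    pvSt s i = (pr, br, false) → pvLoopA s s.length i pr br = pvAux s i := by
  intro fuel
  induction fuel with
  | zero =>
    intro i pr br hf hst
    have : ¬ i < s.length := by omega
    rw [pvLoopA, pvAux]
    simp [this]
  | succ fuel ih =>
    intro i pr br hf hst
    by_cases hi : i < s.length
    · have hch : s.getD i ' ' = s[i] := List.getD_eq_getElem s ' ' hi
      have hslice : PySem.List.slice s (some (i : Int)) (some ((i : Int) + 3)) = (s.drop i).take 3 := by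
        rw [show ((i : Int) + 3) = ((i + 3 : Nat) : Int) by push_cast; ring, PySem.List.slice_natCast]
        congr 1
        omega
      rw [pvLoopA, pvAux]
      simp only [hi, dif_pos, if_pos, hch, hslice]
      by_cases hesc : s[i] = '\\' ∧ i + 1 < s.length
      · -- escape: A jumps to i+2; B marks i+1 escaped
        have hst1 : pvSt s (i + 1) = (pr, br, true) := by
          rw [pvSt_succ s i hi, hst, hesc.1]; simp [pvStep]
        have hst2 : pvSt s (i + 2) = (pr, br, false) := by
          have : i + 1 < s.length := hesc.2
          rw [show i + 2 = (i + 1) + 1 by ring, pvSt_succ s (i + 1) this, hst1]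
          simp [pvStep]
        have hA : pvAndAt s i = false := by
          cases h : pvAndAt s i
          · rfl
          · have := (pvAndAt_head s i h).1
            rw [List.getElem?_eq_getElem hi, hesc.1] at this
            simp at this
        have hok : pvOk s i = false := by simp [pvOk, hA]
        have hok1 : pvOk s (i + 1) = false := by simp [pvOk, hst1]
        have e1 : pvAux s (i + 1) = pvAux s (i + 2) := by
          rw [pvAux]; simp [hesc.2, hok1]
        rw [if_pos hesc, ih (i + 2) pr br (by omega) hst2]
        simp [hok, e1]
      · -- ordinary character
        rw [if_neg hesc]
        by_cases hA : pvAndAt s i = true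
        · -- an "AND" occurrence starts at i
          have hAc : s[i] = 'A' := by
            have := (pvAndAt_head s i hA).1
            rw [List.getElem?_eq_getElem hi] at this
            simpa using this
          have htake : (s.drop i).take 3 = ['A', 'N', 'D'] := by simpa [pvAndAt] using hA
          have hst1 : pvSt s (i + 1) = (pr, br, false) := by
            rw [pvSt_succ s i hi, hst, hAc]; simp [pvStep]
          simp only [hAc, htake]
          have hpbt : (if ('A' : Char) = '(' then (pr + 1, br)
              else if ('A' : Char) = ')' ∧ pr > 0 then (pr - 1, br)
              else if ('A' : Char) = '[' then (pr, br + 1)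
              else if ('A' : Char) = ']' ∧ br > 0 then (pr, br - 1)
              else (pr, br)) = (pr, br) := by simp
          rw [hpbt]
          by_cases hz : pr = 0 ∧ br = 0
          · rw [ih (i + 1) pr br (by omega) hst1]
            simp [pvOk, pvBnd, hA, hst, hz.1, hz.2, (pvAndAt_head s i hA).2]
          · have hok : pvOk s i = false := by
              simp [pvOk, hst]
              intro _ _
              omega
            have hcond : ¬ (pr = 0 ∧ br = 0 ∧ i + 3 ≤ s.length ∧ True) := by tauto
            rw [if_neg hcond, ih (i + 1) pr br (by omega) hst1]
            simp [hok]
        · -- no occurrence at i: A cannot match here, B's reference skips it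
          have hok : pvOk s i = false := by simp [pvOk, hA]
          have hne : (s.drop i).take 3 ≠ ['A', 'N', 'D'] := by
            simpa [pvAndAt] using hA
          rw [show (if pvOk s i = true then true else pvAux s (i + 1)) = pvAux s (i + 1) by
            simp [hok]]
          by_cases h1 : s[i] = '('
          · rw [if_pos h1, if_neg (by tauto)]
            exact ih (i + 1) (pr + 1) br (by omega) (by rw [pvSt_succ s i hi, hst, h1]; simp [pvStep])
          · rw [if_neg h1]
            by_cases h2 : s[i] = ')' ∧ pr > 0
            · rw [if_pos h2, if_neg (by tauto)]
              exact ih (i + 1) (pr - 1) br (by omega)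
                (by rw [pvSt_succ s i hi, hst, h2.1]; simp [pvStep, h2.2])
            · rw [if_neg h2]
              by_cases h3 : s[i] = '['
              · rw [if_pos h3, if_neg (by tauto)]
                exact ih (i + 1) pr (br + 1) (by omega) (by rw [pvSt_succ s i hi, hst, h3]; simp [pvStep])
              · rw [if_neg h3]
                by_cases h4 : s[i] = ']' ∧ br > 0
                · rw [if_pos h4, if_neg (by tauto)]
                  exact ih (i + 1) pr (br - 1) (by omega)
                    (by rw [pvSt_succ s i hi, hst, h4.1]; simp [pvStep, h4.2])
                · rw [if_neg h4, if_neg (by tauto)]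
                  by_cases h5 : s[i] = '\\'
                  · -- trailing backslash: i + 1 = length, both sides end the scan
                    have hn1 : ¬ i + 1 < s.length := by tauto
                    have l1 : pvLoopA s s.length (i + 1) pr br = false := by
                      rw [pvLoopA]; simp [hn1]
                    have r1 : pvAux s (i + 1) = false := by
                      rw [pvAux]; simp [hn1]
                    rw [l1, r1]
                  · have hstep : pvSt s (i + 1) = (pr, br, false) := by
                      rw [pvSt_succ s i hi, hst]
                      simp only [pvStep]
                      split_ifs <;> simp_all
                    exact ih (i + 1) pr br (by omega) hstep
    · rw [pvLoopA, pvAux]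
      simp [hi]
theorem pvAndAt_false_of_no_infix (s : List Char) (k : Nat)
    (h : ¬ ['A', 'N', 'D'] <:+: s.drop k) : ∀ j, k ≤ j → pvAndAt s j = false := by
  intro j hj
  cases hAj : pvAndAt s j
  · rfl
  · exfalso
    apply h
    have hpre := (pvAndAt_prefix s j).mp hAj
    have hdd : s.drop j = (s.drop k).drop (j - k) := by
      rw [List.drop_drop]
      congr 1
      omega
    rw [hdd] at hpre
    exact hpre.isInfix.trans (List.drop_suffix (j - k) (s.drop k)).isInfix

theorem pvLoop2_eq (s : List Char) : ∀ (fuel k : Nat), k ≤ s.length → s.length + 1 - k ≤ fuel →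
    pvLoop2 s s.length (pvEscList s (0, 0, false)) (pvDepList s (0, 0, false)) fuel
      (PySem.Chars.findFrom s ['A', 'N', 'D'] (k : Int) none) = pvAux s k := by
  intro fuel
  induction fuel with
  | zero => intro k hk hf; omega
  | succ fuel ih =>
    intro k hk hf
    by_cases hq : PySem.Chars.findFrom s ['A', 'N', 'D'] (k : Int) none = -1
    · rw [pvLoop2, if_pos hq]
      have hno := (PySem.Chars.findFrom_natCast_eq_neg_one_iff s ['A', 'N', 'D'] k hk).mp hq
      exact (pvAux_false s (s.length - k) k (by omega) (pvAndAt_false_of_no_infix s k hno)).symm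
    · obtain ⟨hkq, hpre, hmin⟩ := PySem.Chars.findFrom_natCast_spec s ['A', 'N', 'D'] k hk hq
      set q := PySem.Chars.findFrom s ['A', 'N', 'D'] (k : Int) none with hqdef
      have hq0 : 0 ≤ q := le_trans (by exact_mod_cast Int.natCast_nonneg k) hkq
      set p := q.toNat with hpdef
      have hkp : k ≤ p := by omega
      have hAp : pvAndAt s p = true := (pvAndAt_prefix s p).mpr hpre
      have hp3 : p + 3 ≤ s.length := (pvAndAt_head s p hAp).2
      have hpn : p < s.length := by omega
      have hskip : pvAux s k = pvAux s p :=
        pvAux_skip s (p - k) k p (by omega) hkp (by omega)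
          (fun j h1 h2 => by
            cases hAj : pvAndAt s j
            · rfl
            · exact absurd ((pvAndAt_prefix s j).mp hAj) (hmin j (by exact_mod_cast Int.ofNat_le.mpr h1) (by omega)))
      have hE : (pvEscList s (0, 0, false)).getD p false = (pvSt s p).2.2 := by
        rw [List.getD_eq_getElem?_getD, pvEscList_get s (0, 0, false) p hpn]
        rfl
      have hD : (pvDepList s (0, 0, false)).getD p 0 = (pvSt s p).1 + (pvSt s p).2.1 := by
        rw [List.getD_eq_getElem?_getD, pvDepList_get s (0, 0, false) p hpn]
        rfl
      have hq1 : q + 1 = ((p + 1 : Nat) : Int) := by omega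
      rw [pvLoop2, if_neg hq]
      simp only [← hpdef]
      rw [hE, hD, hq1, hskip]
      rw [pvAux]
      have hrec : pvLoop2 s s.length (pvEscList s (0, 0, false)) (pvDepList s (0, 0, false)) fuel
          (PySem.Chars.findFrom s ['A', 'N', 'D'] ((p + 1 : Nat) : Int) none) = pvAux s (p + 1) :=
        ih (p + 1) (by omega) (by omega)
      rw [hrec]
      simp only [hpn, if_pos, pvOk, hAp, Bool.true_and]
      by_cases he : (pvSt s p).2.2
      · simp [he]
      · by_cases hd : (pvSt s p).1 + (pvSt s p).2.1 = 0
        · simp only [he, hd]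
          simp [pvBnd]
        · simp [he, show ¬((pvSt s p).1 = 0 ∧ (pvSt s p).2.1 = 0) from by omega]

-- ===== VERDICT (by name: the statement is the Claim_ definition above) =====
theorem has_top_level_AND_py_spec : Claim_equal_has_top_level_AND_py := by
  intro text _
  unfold Spec_has_top_level_AND_py has_top_level_AND_py has_top_level_AND_py_alt
  by_cases hin : PySem.Str.isIn "AND" text = true
  · simp only [hin, Bool.not_true, Bool.false_eq_true, if_false]
    rw [pvLoopA_eq text.toList text.toList.length 0 0 0 (by omega) rfl]
    rw [pvPass1_eq]
    simp only [List.nil_append]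
    rw [← PySem.Chars.findFrom_zero, show (0 : Int) = ((0 : Nat) : Int) by simp]
    rw [pvLoop2_eq text.toList (text.toList.length + 1) 0 (by omega) (by omega)]
  · have hin' : PySem.Chars.isIn ['A', 'N', 'D'] text.toList = false := by simpa using hin
    simp [hin']
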